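-- pv_equiv track=rewrite | github.com/Paul2021-R/2024-study-algorithm | synap_coding/02_암아존 배조스씨_2.py | count_word_second
-- ===== SOURCE A (Python) =====
-- def count_word_second(number_part):
--     result = 0
--     for i, digit in enumerate(number_part):
--         if i == 0 and digit != 0:
--             result += 1
--         if i != 0 and digit != 0:
--             result += 2
--     if result != 0:
--         result += 1
--     return result
-- ===== SOURCE B (Python) =====
-- def count_word_second(number_part):
--     n = len(number_part) - number_part.count(0)
--     if n == 0:
--         return 0
--     return 2 * n + (number_part[0] == 0)
-- ===== Notes on version B (the rewrite author's own statement) =====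
-- stated objective: simpler
-- what changed: Drops the enumerate loop with positional branches and the final 'if result: result += 1' fixup: B derives the nonzero count from len minus list.count(0), early-returns 0 when there are none, and otherwise returns the direct closed form 2*n plus one extra only when the first digit is zero.
import Mathlib
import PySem

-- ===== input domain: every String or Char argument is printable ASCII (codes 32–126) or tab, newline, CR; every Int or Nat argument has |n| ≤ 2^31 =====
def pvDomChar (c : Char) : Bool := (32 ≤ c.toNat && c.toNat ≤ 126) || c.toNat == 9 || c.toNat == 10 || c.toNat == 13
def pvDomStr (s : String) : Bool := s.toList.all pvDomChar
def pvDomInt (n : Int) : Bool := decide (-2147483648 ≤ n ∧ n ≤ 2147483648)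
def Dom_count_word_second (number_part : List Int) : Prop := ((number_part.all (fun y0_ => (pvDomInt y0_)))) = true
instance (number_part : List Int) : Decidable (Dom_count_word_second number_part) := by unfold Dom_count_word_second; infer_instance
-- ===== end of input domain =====

-- B drops A's positional loop and final fixup: it derives the nonzero count from len - count(0),
-- returns 0 early, else the direct closed form 2*n (+1 only when the first digit is 0); objective: simpler.

-- ===== PORT A =====
def count_word_second (number_part : List Int) : Int :=
  let result : Int :=
    (PySem.List.enumerate number_part).foldl
      (fun result p =>
        let result := if p.1 = 0 ∧ p.2 ≠ 0 then result + 1 else result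
        if p.1 ≠ 0 ∧ p.2 ≠ 0 then result + 2 else result) 0
  if result ≠ 0 then result + 1 else result

-- ===== PORT B =====
def count_word_second_alt (number_part : List Int) : Int :=
  let n : Int := (number_part.length : Int) - PySem.List.count number_part 0
  if n = 0 then 0
  else
    -- number_part[0]: n ≠ 0 guarantees the list is nonempty, so the [] arm is unreachable
    match number_part with
    | [] => 0
    | d :: _ => 2 * n + (if d = 0 then 1 else 0)

-- ===== PRECONDITION & SPEC =====
def Spec_count_word_second (number_part : List Int) (out : Int) : Prop := out = count_word_second_alt number_part
instance (number_part : List Int) (out : Int) : Decidable (Spec_count_word_second number_part out) := by unfold Spec_count_word_second; infer_instance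

-- ===== CLAIM =====
def Claim_equal_count_word_second : Prop := ∀ (number_part : List Int), Dom_count_word_second number_part → Spec_count_word_second number_part (count_word_second number_part)

-- ===== LEMMAS AND PROOFS =====
-- A's loop body.
def pvStep (result : Int) (p : Int × Int) : Int :=
  let result := if p.1 = 0 ∧ p.2 ≠ 0 then result + 1 else result
  if p.1 ≠ 0 ∧ p.2 ≠ 0 then result + 2 else result

-- From index ≥ 1 onward, each nonzero digit adds 2.
theorem pvLoop_tail (xs : List Int) : ∀ (s acc : Int), 1 ≤ s →
    (PySem.List.enumerate xs s).foldl pvStep acc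
      = acc + 2 * ((xs.filter (fun d => d ≠ 0)).length : Int) := by
  induction xs with
  | nil => intro s acc _; simp [PySem.List.enumerate_nil]
  | cons d xs ih =>
    intro s acc hs
    rw [PySem.List.enumerate_cons, List.foldl_cons, ih (s+1) _ (by omega)]
    have hs0 : ¬ s = 0 := by omega
    by_cases hd : d = 0 <;>
      simp [pvStep, hd, hs0, List.filter_cons] <;> push_cast <;> ring

theorem pvLoop_eq (xs : List Int) :
    (PySem.List.enumerate xs).foldl pvStep 0
      = 2 * ((xs.filter (fun d => d ≠ 0)).length : Int)
        - (match xs with | [] => (0:Int) | d :: _ => if d ≠ 0 then 1 else 0) := by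
  cases xs with
  | nil => simp [PySem.List.enumerate_nil]
  | cons d xs =>
    rw [PySem.List.enumerate_cons, List.foldl_cons, pvLoop_tail xs (0+1) _ (by omega)]
    by_cases hd : d = 0 <;>
      simp [pvStep, hd, List.filter_cons] <;> push_cast <;> ring

-- len - count(0) is the number of nonzero elements.
theorem pvLen_sub_count (xs : List Int) :
    (xs.length : Int) - PySem.List.count xs 0
      = ((xs.filter (fun d => d ≠ 0)).length : Int) := by
  induction xs with
  | nil => simp [PySem.List.count]
  | cons d xs ih =>
    by_cases hd : d = 0 <;>
      simp [PySem.List.count, List.count_cons, hd, List.filter_cons] at * <;>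
      push_cast at * <;> omega

-- ===== VERDICT =====
theorem count_word_second_spec : Claim_equal_count_word_second := by
  intro xs _
  show count_word_second xs = count_word_second_alt xs
  unfold count_word_second count_word_second_alt
  rw [show (fun (result : Int) (p : Int × Int) =>
        let result := if p.1 = 0 ∧ p.2 ≠ 0 then result + 1 else result
        if p.1 ≠ 0 ∧ p.2 ≠ 0 then result + 2 else result) = pvStep from rfl]
  rw [pvLoop_eq xs, pvLen_sub_count xs]
  cases xs with
  | nil => simp
  | cons d xs =>
    by_cases hd : d = 0
    · subst hd
      simp only [List.filter_cons, ne_eq, not_true_eq_false, decide_false,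
        Bool.false_eq_true, if_false, ite_true, ite_false, sub_zero, if_true]
      split_ifs <;> omega
    · have hF1 : ((d :: xs).filter (fun x => x ≠ 0)).length
               = (xs.filter (fun x => x ≠ 0)).length + 1 := by
        simp [List.filter_cons, hd]
      simp only [ne_eq, hd, not_false_eq_true, ite_true, ite_false, if_false, if_true]
      rw [hF1]
      push_cast
      split_ifs <;> omega
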